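-- pv_equiv track=rewrite | github.com/Lee-3-8/CodingTest-Study | level1/1차_비밀지도/규빈.py | solution
-- ===== SOURCE A (Python) =====
-- def digit(n,number):
--     a = []
--     while number>0: # 2진수구하기
--         a.insert(0,number%2)
--         number = number//2
--     while n - len(a) > 0: # 0채워주기
--         a.insert(0,0)
--     return a
--
-- def solution(n, arr1, arr2):
--     mapArr = []
--     for i in range(n):
--         map = ''
--         answer1 = digit(n,arr1[i])
--         answer2 = digit(n,arr2[i])
--         for j in range(n):
--             if answer1[j] + answer2[j] > 0:
--                 map += '#'
--             else:
--                 map += ' '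
--
--         mapArr.append(map)
--
--     return mapArr
-- ===== SOURCE B (Python) =====
-- def solution(n, arr1, arr2):
--     def row(x, y):
--         r1 = (bin(x)[2:] if x > 0 else '').rjust(n, '0')
--         r2 = (bin(y)[2:] if y > 0 else '').rjust(n, '0')
--         return ''.join('#' if a == '1' or b == '1' else ' '
--                        for a, b in zip(r1[:n], r2[:n]))
--     return [row(arr1[i], arr2[i]) for i in range(n)]
-- ===== Notes on version B (the rewrite author's own statement) =====
-- stated objective: faster
-- what changed: Replaces the per-row list-building with repeated insert(0,...) (quadratic per row) and the per-index sum loop by bin()-string formatting with rjust padding and a single zip/join pass per row.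
import Mathlib
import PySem

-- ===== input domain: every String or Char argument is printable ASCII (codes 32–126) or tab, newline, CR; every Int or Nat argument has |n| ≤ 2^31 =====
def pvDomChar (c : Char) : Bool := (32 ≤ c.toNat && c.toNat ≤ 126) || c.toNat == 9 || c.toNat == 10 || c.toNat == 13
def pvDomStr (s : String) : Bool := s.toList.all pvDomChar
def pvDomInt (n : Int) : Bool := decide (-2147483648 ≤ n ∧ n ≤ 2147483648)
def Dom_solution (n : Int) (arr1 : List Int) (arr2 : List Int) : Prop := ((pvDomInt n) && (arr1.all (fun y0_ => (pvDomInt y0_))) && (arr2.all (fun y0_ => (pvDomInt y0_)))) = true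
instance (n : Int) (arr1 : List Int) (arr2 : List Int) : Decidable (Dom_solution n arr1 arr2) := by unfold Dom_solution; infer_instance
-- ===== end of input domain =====

-- B replaces A's insert(0,..)-built digit lists and per-index sum loop by binary string
-- formatting plus one zip/join pass per row (objective: faster, measured).

-- ===== PORT A =====
-- while number > 0: a.insert(0, number % 2); number = number // 2
def digitLoop1 (number : Int) (a : List Int) : List Int :=
  if 0 < number then
    digitLoop1 (PySem.Int.floordiv number 2) (PySem.Int.mod number 2 :: a)
  else a
termination_by number.toNat
decreasing_by
  have h2 : PySem.Int.floordiv number 2 = number / 2 :=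
    PySem.Int.floordiv_eq_ediv_of_pos (by omega)
  rw [h2]; omega

-- while n - len(a) > 0: a.insert(0, 0)
def digitLoop2 (n : Int) (a : List Int) : List Int :=
  if 0 < n - a.length then digitLoop2 n (0 :: a) else a
termination_by (n - a.length).toNat
decreasing_by simp; omega

def digit (n : Int) (number : Int) : List Int := digitLoop2 n (digitLoop1 number [])

def solution (n : Int) (arr1 : List Int) (arr2 : List Int) : List String :=
  (PySem.List.pyRange 0 n 1).foldl (fun mapArr i =>
    -- arr1[i] / arr2[i]: in range under Pre_solution, so the default is never used
    let answer1 := digit n (PySem.List.pyGetD arr1 i 0)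
    let answer2 := digit n (PySem.List.pyGetD arr2 i 0)
    let map := (PySem.List.pyRange 0 n 1).foldl (fun m j =>
      if PySem.List.pyGetD answer1 j 0 + PySem.List.pyGetD answer2 j 0 > 0
      then m ++ "#" else m ++ " ") ""
    mapArr ++ [map]) []

-- ===== PORT B =====
-- bin(x)[2:] for x > 0: most-significant-first binary digits, via Mathlib's Nat.digits (lsb-first, reversed)
def binChars (x : Int) : List Char :=
  (Nat.digits 2 x.toNat).reverse.map (fun d => if d = 1 then '1' else '0')

-- s.rjust(n, '0') (exact: Python pads with max(n - len, 0) zeros)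
def rjust0 (n : Int) (s : List Char) : List Char :=
  List.replicate (n - (s.length : Int)).toNat '0' ++ s

-- one row of B; r[:n] is List.take n.toNat (exact for the n ≥ 0 at which B's loop body runs)
def rowB (n : Int) (x : Int) (y : Int) : String :=
  let r1 := rjust0 n (if 0 < x then binChars x else [])
  let r2 := rjust0 n (if 0 < y then binChars y else [])
  String.ofList (((r1.take n.toNat).zip (r2.take n.toNat)).map
    (fun p => if p.1 = '1' ∨ p.2 = '1' then '#' else ' '))

def solution_alt (n : Int) (arr1 : List Int) (arr2 : List Int) : List String :=
  (PySem.List.pyRange 0 n 1).map (fun i =>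
    rowB n (PySem.List.pyGetD arr1 i 0) (PySem.List.pyGetD arr2 i 0))

-- ===== PRECONDITION & SPEC =====
-- Pre_ excludes exactly the inputs where Python A raises IndexError on arr1[i]/arr2[i] (n > len).
def Pre_solution (n : Int) (arr1 : List Int) (arr2 : List Int) : Prop :=
  n ≤ arr1.length ∧ n ≤ arr2.length
instance (n : Int) (arr1 : List Int) (arr2 : List Int) : Decidable (Pre_solution n arr1 arr2) := by
  unfold Pre_solution; infer_instance
def pvWitness_solution : Int × List Int × List Int := (2, [1, 2], [2, 3])

def Spec_solution (n : Int) (arr1 : List Int) (arr2 : List Int) (out : List String) : Prop := out = solution_alt n arr1 arr2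
instance (n : Int) (arr1 : List Int) (arr2 : List Int) (out : List String) : Decidable (Spec_solution n arr1 arr2 out) := by unfold Spec_solution; infer_instance

-- ===== CLAIM (what is proved, stated in full; the proofs are below) =====
def Claim_equal_solution : Prop := ∀ (n : Int) (arr1 : List Int) (arr2 : List Int), Dom_solution n arr1 arr2 → Pre_solution n arr1 arr2 → Spec_solution n arr1 arr2 (solution n arr1 arr2)

-- ===== LEMMAS AND PROOFS =====

-- reference msb-first bit list
def myBits : Nat → List Int
  | 0 => []
  | k+1 => myBits ((k+1)/2) ++ [(((k+1) % 2 : Nat) : Int)]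
decreasing_by exact Nat.div_lt_self (Nat.succ_pos k) (by omega)

def toCh (b : Int) : Char := if b = 1 then '1' else '0'

lemma digitLoop1_eq (x : Int) (a : List Int) : digitLoop1 x a = myBits x.toNat ++ a := by
  by_cases h : 0 < x
  · have hd : PySem.Int.floordiv x 2 = x / 2 := PySem.Int.floordiv_eq_ediv_of_pos (by omega)
    have hm : PySem.Int.mod x 2 = x % 2 := PySem.Int.mod_eq_emod_of_pos (by omega)
    rw [digitLoop1, if_pos h, digitLoop1_eq, hd, hm]
    obtain ⟨k, hk, hkp⟩ : ∃ k : Nat, x = (k : Int) ∧ 0 < k := ⟨x.toNat, by omega, by omega⟩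
    subst hk
    have h2 : ((k : Int) / 2).toNat = k / 2 := by omega
    have h3 : (k : Int).toNat = k := by omega
    rw [h2, h3]
    obtain ⟨m, hm⟩ : ∃ m, k = m + 1 := ⟨k - 1, by omega⟩
    subst hm
    rw [myBits]
    simp
  · rw [digitLoop1, if_neg h]
    have : x.toNat = 0 := by omega
    rw [this, myBits]; simp
termination_by x.toNat
decreasing_by
  have h2 : PySem.Int.floordiv x 2 = x / 2 := PySem.Int.floordiv_eq_ediv_of_pos (by omega)
  rw [h2]; omega

lemma digitLoop2_eq (n : Int) (a : List Int) :
    digitLoop2 n a = List.replicate ((n - (a.length : Int)).toNat) 0 ++ a := by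
  by_cases h : 0 < n - (a.length : Int)
  · rw [digitLoop2, if_pos h, digitLoop2_eq]
    have h1 : ((n - ((0 :: a).length : Int)).toNat) + 1 = (n - (a.length : Int)).toNat := by
      simp; omega
    rw [← h1, List.replicate_succ']
    simp
  · rw [digitLoop2, if_neg h]
    have : (n - (a.length : Int)).toNat = 0 := by omega
    rw [this]; simp
termination_by (n - a.length).toNat
decreasing_by simp; omega

lemma digit_eq (n x : Int) :
    digit n x = List.replicate ((n - ((myBits x.toNat).length : Int)).toNat) 0 ++ myBits x.toNat := by
  simp [digit, digitLoop1_eq, digitLoop2_eq]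

lemma myBits_mem (k : Nat) : ∀ b ∈ myBits k, b = 0 ∨ b = 1 := by
  induction k using Nat.strong_induction_on with
  | _ k ih =>
    match k with
    | 0 => intro b hb; rw [myBits] at hb; simp at hb
    | k+1 =>
      intro b hb
      rw [myBits] at hb
      rcases List.mem_append.1 hb with h | h
      · exact ih ((k+1)/2) (Nat.div_lt_self (Nat.succ_pos k) (by omega)) b h
      · simp at h; omega

lemma digit_mem (n x : Int) : ∀ b ∈ digit n x, b = 0 ∨ b = 1 := by
  rw [digit_eq]
  intro b hb
  rcases List.mem_append.1 hb with h | h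
  · left; exact List.eq_of_mem_replicate h
  · exact myBits_mem _ b h

lemma digit_len (n x : Int) : n.toNat ≤ (digit n x).length := by
  rw [digit_eq]; simp; omega

lemma binChars_nat (k : Nat) :
    (Nat.digits 2 k).reverse.map (fun d => if d = 1 then '1' else '0') = (myBits k).map toCh := by
  induction k using Nat.strong_induction_on with
  | _ k ih =>
    match k with
    | 0 => rw [myBits]; simp
    | k+1 =>
      rw [Nat.digits_def' (by omega : 1 < 2) (Nat.succ_pos k), myBits]
      simp only [List.reverse_cons, List.map_append, List.map_cons, List.map_nil]
      rw [ih ((k+1)/2) (Nat.div_lt_self (Nat.succ_pos k) (by omega))]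
      have hiff : ((k:Int) + 1) % 2 = 1 ↔ (k + 1) % 2 = 1 := by omega
      simp [toCh, hiff]

lemma binChars_eq (x : Int) :
    (if 0 < x then binChars x else []) = (myBits x.toNat).map toCh := by
  by_cases h : 0 < x
  · rw [if_pos h]; exact binChars_nat x.toNat
  · rw [if_neg h]
    have : x.toNat = 0 := by omega
    rw [this, myBits]; simp

lemma foldG (u v : List Int) (hu : ∀ b ∈ u, b = 0 ∨ b = 1) (hv : ∀ b ∈ v, b = 0 ∨ b = 1)
    (k : Nat) (hku : k ≤ u.length) (hkv : k ≤ v.length) :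
    (List.range k).foldl (fun (m : String) (j : Nat) =>
      if PySem.List.pyGetD u (j : Int) 0 + PySem.List.pyGetD v (j : Int) 0 > 0
      then m ++ "#" else m ++ " ") ""
    = String.ofList ((((u.map toCh).take k).zip ((v.map toCh).take k)).map
        (fun p => if p.1 = '1' ∨ p.2 = '1' then '#' else ' ')) := by
  induction k with
  | zero => simp
  | succ k ih =>
    rw [List.range_succ, List.foldl_append]
    rw [ih (by omega) (by omega)]
    have hk1 : k < u.length := by omega
    have hk2 : k < v.length := by omega
    have g1 : PySem.List.pyGetD u (k : Int) 0 = u[k] := by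
      simp [PySem.List.pyGetD_natCast, List.getD_eq_getElem?_getD, hk1]
    have g2 : PySem.List.pyGetD v (k : Int) 0 = v[k] := by
      simp [PySem.List.pyGetD_natCast, List.getD_eq_getElem?_getD, hk2]
    have tk1 : (u.map toCh).take (k+1) = (u.map toCh).take k ++ [toCh u[k]] := by
      rw [List.take_add_one]; simp [hk1]
    have tk2 : (v.map toCh).take (k+1) = (v.map toCh).take k ++ [toCh v[k]] := by
      rw [List.take_add_one]; simp [hk2]
    rw [tk1, tk2, List.zip_append (by simp; omega), List.map_append]
    simp only [List.foldl_cons, List.foldl_nil, g1, g2]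
    have hcond : (u[k] + v[k] > 0) ↔ (toCh u[k] = '1' ∨ toCh v[k] = '1') := by
      rcases hu u[k] (List.getElem_mem hk1) with h1 | h1 <;>
      rcases hv v[k] (List.getElem_mem hk2) with h2 | h2 <;>
      simp [h1, h2, toCh]
    by_cases hc : u[k] + v[k] > 0
    · rw [if_pos hc]
      simp only [List.zip_cons_cons, List.zip_nil_left, List.map_cons, List.map_nil,
        if_pos (hcond.1 hc), String.ofList_append]
    · rw [if_neg hc]
      simp only [List.zip_cons_cons, List.zip_nil_left, List.map_cons, List.map_nil,
        if_neg (fun h => hc (hcond.2 h)), String.ofList_append]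

lemma r1_eq (n x : Int) :
    rjust0 n (if 0 < x then binChars x else []) = (digit n x).map toCh := by
  rw [binChars_eq, rjust0, digit_eq]
  simp [toCh]

lemma rowA_eq_rowB (n x y : Int) :
    (PySem.List.pyRange 0 n 1).foldl (fun m j =>
      if PySem.List.pyGetD (digit n x) j 0 + PySem.List.pyGetD (digit n y) j 0 > 0
      then m ++ "#" else m ++ " ") "" = rowB n x y := by
  show _ = rowB n x y
  rw [rowB]
  simp only [r1_eq]
  rw [PySem.List.pyRange_one, List.foldl_map]
  simp only [Int.zero_add, Int.sub_zero]
  exact foldG (digit n x) (digit n y) (digit_mem n x) (digit_mem n y) n.toNat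
    (digit_len n x) (digit_len n y)

theorem solution_spec_aux (n : Int) (arr1 : List Int) (arr2 : List Int) :
    solution n arr1 arr2 = solution_alt n arr1 arr2 := by
  unfold solution solution_alt
  rw [PySem.List.foldl_append_singleton_eq_map]
  simp only [List.nil_append]
  exact List.map_congr_left (fun i _ => rowA_eq_rowB n _ _)

-- ===== VERDICT (by name: the statement is the Claim_ definition above) =====
theorem solution_spec : Claim_equal_solution := by
  intro n arr1 arr2 _ _
  exact solution_spec_aux n arr1 arr2
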